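-- pv_equiv track=rewrite | github.com/lukerlars/Assignment1_SaRiNetworks | autokey_decryption.py | word_looping
-- ===== SOURCE A (Python) =====
-- def vigenere_decode(ciphertext, keyword):
--     """Takes keyword and ciphertext, returns deciphered rawtext """
--     ciphertext = ciphertext.replace(' ','')
--     decrypted = ''
--     for i in range(len(ciphertext)):
--         keychar = keyword[i % len(keyword)]
--         dec_ord =(ord(ciphertext[i])- ord(keychar))%26 + ord('A')
--         decrypted += chr(dec_ord)
--     return decrypted
--
-- def rotate(word):
--     return ''.join([w for w in (word[-1] + word[:(len(word)-1)])])
--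
-- def word_looping(ciphertext, keyword):
--     """ """
--     decrypts =[]
--     kw_variants = []
--     for i in range(len(keyword)):
--         dec = vigenere_decode(ciphertext, keyword)
--         decrypts.append(dec)
--         kw_variants.append(keyword)
--         keyword = rotate(keyword)
--     return decrypts, kw_variants
-- ===== SOURCE B (Python) =====
-- def vigenere_decode(ciphertext, keyword):
--     """Takes keyword and ciphertext, returns deciphered rawtext """
--     ciphertext = ciphertext.replace(' ', '')
--     decrypted = ''
--     for i in range(len(ciphertext)):
--         keychar = keyword[i % len(keyword)]
--         dec_ord = (ord(ciphertext[i]) - ord(keychar)) % 26 + ord('A')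
--         decrypted += chr(dec_ord)
--     return decrypted
--
-- def word_looping(ciphertext, keyword):
--     n = len(keyword)
--     kw_variants = [keyword[n - i:] + keyword[:n - i] for i in range(n)]
--     decrypts = [vigenere_decode(ciphertext, v) for v in kw_variants]
--     return decrypts, kw_variants
-- ===== Notes on version B (the rewrite author's own statement) =====
-- stated objective: simpler
-- what changed: Replaces A's single interleaved loop that mutates the keyword through a stateful rotate helper with two independent passes: a closed-form slice expression builds every keyword rotation directly, and a second map decodes each variant.
import Mathlib
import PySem

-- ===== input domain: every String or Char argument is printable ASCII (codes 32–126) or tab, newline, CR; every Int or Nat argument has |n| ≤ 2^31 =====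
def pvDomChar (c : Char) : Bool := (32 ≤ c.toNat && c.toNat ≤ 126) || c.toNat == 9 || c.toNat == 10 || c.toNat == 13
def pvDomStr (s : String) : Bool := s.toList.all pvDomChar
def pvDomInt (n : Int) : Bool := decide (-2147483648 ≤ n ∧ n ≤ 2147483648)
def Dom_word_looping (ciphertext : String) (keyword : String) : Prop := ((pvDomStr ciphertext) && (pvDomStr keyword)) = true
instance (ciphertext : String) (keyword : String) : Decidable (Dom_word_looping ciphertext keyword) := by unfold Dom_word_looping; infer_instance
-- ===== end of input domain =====

-- B replaces A's interleaved rotate-and-decode loop by two independent map passes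
-- over closed-form slice rotations (objective: simpler).

-- ===== PORT A =====
-- vigenere_decode is IDENTICAL in Source A and Source B, so both ports share this helper.
def vigDecode (ciphertext : List Char) (keyword : List Char) : List Char :=
  let ct := PySem.Chars.replace ciphertext [' '] []
  (PySem.List.pyRange 0 (ct.length : Int) 1).foldl
    (fun decrypted i =>
      let keychar := PySem.List.pyGetD keyword (PySem.Int.mod i (keyword.length : Int)) ' '
      let decOrd := PySem.Int.mod ((PySem.List.pyGetD ct i ' ').toNat - (keychar.toNat : Int)) 26 + 65
      decrypted ++ [Char.ofNat decOrd.toNat]) []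

-- rotate: word[-1] + word[:len(word)-1]  (''.join over the chars is the identity)
def rotateA (word : List Char) : List Char :=
  PySem.List.pyGetD word (-1) ' ' :: PySem.List.slice word none (some ((word.length : Int) - 1))

def word_looping (ciphertext : String) (keyword : String) : List String × List String :=
  let r := (PySem.List.pyRange 0 (keyword.toList.length : Int) 1).foldl
    (fun (st : List (List Char) × List (List Char) × List Char) _ =>
      let dec := vigDecode ciphertext.toList st.2.2
      (st.1 ++ [dec], st.2.1 ++ [st.2.2], rotateA st.2.2))
    ([], [], keyword.toList)
  (r.1.map (fun l => String.ofList l), r.2.1.map (fun l => String.ofList l))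

-- ===== PORT B =====
def word_looping_alt (ciphertext : String) (keyword : String) : List String × List String :=
  let kw := keyword.toList
  let n : Int := (kw.length : Int)
  let kwVariants := (PySem.List.pyRange 0 n 1).map
    (fun i => PySem.List.slice kw (some (n - i)) none ++ PySem.List.slice kw none (some (n - i)))
  let decrypts := kwVariants.map (fun v => vigDecode ciphertext.toList v)
  (decrypts.map (fun l => String.ofList l), kwVariants.map (fun l => String.ofList l))

-- ===== PRECONDITION & SPEC =====
def Spec_word_looping (ciphertext : String) (keyword : String) (out : List String × List String) : Prop := out = word_looping_alt ciphertext keyword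
instance (ciphertext : String) (keyword : String) (out : List String × List String) : Decidable (Spec_word_looping ciphertext keyword out) := by unfold Spec_word_looping; infer_instance

-- ===== CLAIM (what is proved, stated in full; the proofs are below) =====
def Claim_equal_word_looping : Prop := ∀ (ciphertext : String) (keyword : String), Dom_word_looping ciphertext keyword → Spec_word_looping ciphertext keyword (word_looping ciphertext keyword)

-- ===== LEMMAS AND PROOFS =====

theorem rotateA_append_singleton (xs : List Char) (x : Char) :
    rotateA (xs ++ [x]) = x :: xs := by
  unfold rotateA
  rw [PySem.List.pyGetD_neg_one_append_singleton]
  congr 1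
  have h : ((xs ++ [x]).length : Int) - 1 = (xs.length : Nat) := by simp
  rw [h, PySem.List.slice_to_natCast, List.take_left]

theorem rot_closed (kw : List Char) (i : Nat) (h : i ≤ kw.length) :
    rotateA^[i] kw = kw.drop (kw.length - i) ++ kw.take (kw.length - i) := by
  induction i with
  | zero => simp
  | succ i ih =>
      have hi : i ≤ kw.length := by omega
      rw [Function.iterate_succ_apply', ih hi]
      have h1 : kw.length - i = (kw.length - (i+1)) + 1 := by omega
      have h2 : kw.length - (i+1) < kw.length := by omega
      have ht : kw.take (kw.length - i)
          = kw.take (kw.length - (i+1)) ++ [kw[kw.length - (i+1)]] := by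
        rw [h1, List.take_add_one, List.getElem?_eq_getElem h2]
        simp
      have hd : kw.drop (kw.length - (i+1))
          = kw[kw.length - (i+1)] :: kw.drop (kw.length - i) := by
        rw [h1]
        exact (List.drop_eq_getElem_cons h2)
      rw [ht, ← List.append_assoc, rotateA_append_singleton, hd]
      simp

theorem loopA_eq (ct kw : List Char) (n : Nat) :
    (PySem.List.pyRange 0 (n : Int) 1).foldl
      (fun (st : List (List Char) × List (List Char) × List Char) _ =>
        (st.1 ++ [vigDecode ct st.2.2], st.2.1 ++ [st.2.2], rotateA st.2.2))
      ([], [], kw)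
    = ((List.range n).map (fun i => vigDecode ct (rotateA^[i] kw)),
       (List.range n).map (fun i => rotateA^[i] kw),
       rotateA^[n] kw) := by
  induction n with
  | zero => simp
  | succ n ih =>
      have hc : ((n + 1 : Nat) : Int) = (n : Int) + 1 := by push_cast; ring
      rw [hc, PySem.List.pyRange_one_succ_right (by positivity), List.foldl_append, ih]
      simp [List.range_succ, Function.iterate_succ_apply']

theorem word_looping_eq (ciphertext keyword : String) :
    word_looping ciphertext keyword = word_looping_alt ciphertext keyword := by
  unfold word_looping word_looping_alt
  rw [loopA_eq]
  have hmap : ∀ {α : Type} (f : List Char → α),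
      (PySem.List.pyRange 0 (keyword.toList.length : Int) 1).map
        (fun i => f (PySem.List.slice keyword.toList (some ((keyword.toList.length : Int) - i)) none
          ++ PySem.List.slice keyword.toList none (some ((keyword.toList.length : Int) - i))))
      = (List.range keyword.toList.length).map (fun i => f (rotateA^[i] keyword.toList)) := by
    intro α f
    rw [PySem.List.pyRange_one, List.map_map]
    apply List.map_congr_left
    intro k hk
    have hk' : k < keyword.toList.length := by
      simpa using (List.mem_range.mp hk)
    have hcast : (keyword.toList.length : Int) - ((0 : Int) + (k : Int))
        = ((keyword.toList.length - k : Nat) : Int) := by omega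
    simp only [Function.comp_apply, hcast]
    rw [PySem.List.slice_from_natCast, PySem.List.slice_to_natCast,
        rot_closed keyword.toList k (Nat.le_of_lt hk')]
  simp only [List.map_map, Function.comp_def]
  rw [hmap (fun v => String.ofList (vigDecode ciphertext.toList v)),
      hmap (fun v => String.ofList v)]

-- ===== VERDICT (by name: the statement is the Claim_ definition above) =====
theorem word_looping_spec : Claim_equal_word_looping := by
  intro ciphertext keyword _
  exact word_looping_eq ciphertext keyword
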